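-- pv_equiv track=rewrite | github.com/JoaquinCampo/kvguard | src/kvguard/detectors.py | detect_looping_onset
-- ===== SOURCE A (Python) =====
-- def detect_looping_onset(
--     token_ids: list[int], window_size: int = 20, min_repeats: int = 3
-- ) -> int | None:
--     """Find the token position where looping begins.
--
--     Returns the start index of the first window whose occurrence count reaches
--     `min_repeats`, or None if no looping is detected. The onset is the start of
--     the second occurrence — the first time the model repeats instead of producing
--     new content.
--     """
--     if len(token_ids) < window_size * min_repeats:
--         return None
--
--     window_positions: dict[tuple[int, ...], list[int]] = {}
--     for i in range(len(token_ids) - window_size + 1):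
--         window = tuple(token_ids[i : i + window_size])
--         positions = window_positions.setdefault(window, [])
--         positions.append(i)
--         if len(positions) >= min_repeats:
--             return positions[1]
--
--     return None
-- ===== SOURCE B (Python) =====
-- def detect_looping_onset(
--     token_ids: list[int], window_size: int = 20, min_repeats: int = 3
-- ) -> int | None:
--     """Single pass over the tokens themselves (not window start indices): a
--     big-endian rolling code keeps the last `window_size` tokens packed into one
--     integer (each token offset into 33 bits), and a dict maps each window code
--     to a (count, second_occurrence) pair instead of a full position list."""
--     n = len(token_ids)
--     if n < window_size * min_repeats:
--         return None
--     if n < window_size: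
--         return None                    # no full window exists
--     BASE = 1 << 33                 # token + 2**31 lies in [0, 2**33)
--     OFF = 1 << 31
--     TOP = BASE ** (window_size - 1)
--     seen: dict[int, tuple[int, int]] = {}
--     code = 0
--     for idx, t in enumerate(token_ids):
--         code = (code % TOP) * BASE + t + OFF   # keep last window_size digits
--         start = idx - window_size + 1
--         if start < 0:
--             continue
--         cnt, second = seen.get(code, (0, -1))
--         cnt += 1
--         if cnt == 2:
--             second = start
--         if cnt >= min_repeats:
--             return second
--         seen[code] = (cnt, second)
--     return None
-- ===== Notes on version B (the rewrite author's own statement) =====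
-- stated objective: alternative
-- what changed: B replaces A's per-position window tuples and dict of position lists by a single pass over the tokens themselves: a big-endian rolling integer code (each token offset into 33 bits, truncated mod BASE^(window_size-1) each step) keys a dict that stores only a (count, second-occurrence) pair per window.
-- outside the precondition, e.g. on detect_looping_onset([1, 2, 3], -1, 2): A returns 2, B returns None; on detect_looping_onset([1, 2, 3, 4, 5], 0, 3): A returns 1, B returns None
import Mathlib
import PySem

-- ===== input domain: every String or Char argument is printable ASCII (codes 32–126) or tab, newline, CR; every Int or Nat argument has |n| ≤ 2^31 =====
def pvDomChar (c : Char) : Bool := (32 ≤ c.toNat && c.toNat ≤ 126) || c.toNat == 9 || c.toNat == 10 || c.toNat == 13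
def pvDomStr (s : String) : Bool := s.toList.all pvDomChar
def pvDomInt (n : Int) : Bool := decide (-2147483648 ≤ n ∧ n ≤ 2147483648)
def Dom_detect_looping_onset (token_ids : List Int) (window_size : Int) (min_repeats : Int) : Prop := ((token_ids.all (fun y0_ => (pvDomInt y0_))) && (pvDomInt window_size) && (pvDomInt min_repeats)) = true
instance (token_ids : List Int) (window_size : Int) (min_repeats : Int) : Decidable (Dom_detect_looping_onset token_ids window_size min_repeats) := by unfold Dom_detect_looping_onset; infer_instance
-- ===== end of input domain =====

-- B keys the position statistics by a big-endian rolling integer code of the current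
-- window (each token offset into 33 bits, truncated mod BASE^(w-1) each step) and stores
-- only a (count, second-occurrence) pair per code instead of A's tuple-keyed position
-- lists (objective: alternative algorithm, same measured cost).


-- ===== PORT A =====
-- the loop 'for i in range(len(token_ids) - window_size + 1)' with early return;
-- 'positions = d.setdefault(window, []); positions.append(i)' (in-place append to the dict's
-- list) is ported as setdefault, then re-inserting the appended list.
def pvALoop (xs : List Int) (w m : Int) :
    List Int → PySem.Dict (List Int) (List Int) → Option Int
  | [], _ => none
  | i :: rest, d =>
    let window := PySem.List.slice xs (some i) (some (i + w))
    let d1 := d.setdefault window []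
    let positions := d1.getD window [] ++ [i]
    let d2 := d1.insert window positions
    if m ≤ (positions.length : Int) then PySem.List.pyGet? positions 1
    else pvALoop xs w m rest d2

def detect_looping_onset (token_ids : List Int) (window_size : Int) (min_repeats : Int) : Option Int :=
  if (token_ids.length : Int) < window_size * min_repeats then none
  else
    pvALoop token_ids window_size min_repeats
      (PySem.List.pyRange 0 ((token_ids.length : Int) - window_size + 1) 1)
      PySem.Dict.empty

-- ===== PORT B =====
-- Source B's 'for idx, t in enumerate(token_ids)' loop: structural recursion on the token list
-- itself carrying (idx, code, seen); 'code % TOP' is Python's mod (TOP > 0 under Pre_),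
-- '<<' constants are written out; 'TOP = BASE ** (window_size - 1)' has a nonnegative
-- exponent under Pre_, ported with .toNat.
def pvBLoop (w m top : Int) :
    List Int → Int → Int → PySem.Dict Int (Int × Int) → Option Int
  | [], _, _, _ => none
  | t :: rest, idx, code, seen =>
    let code' := PySem.Int.mod code top * 8589934592 + t + 2147483648
    if idx - w + 1 < 0 then pvBLoop w m top rest (idx + 1) code' seen
    else
      let p := seen.getD code' (0, -1)
      let cnt := p.1 + 1
      let second := if cnt = 2 then idx - w + 1 else p.2
      if m ≤ cnt then some second
      else pvBLoop w m top rest (idx + 1) code' (seen.insert code' (cnt, second))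

def detect_looping_onset_alt (token_ids : List Int) (window_size : Int) (min_repeats : Int) : Option Int :=
  if (token_ids.length : Int) < window_size * min_repeats then none
  else if (token_ids.length : Int) < window_size then none
  else
    pvBLoop window_size min_repeats (8589934592 ^ (window_size - 1).toNat)
      token_ids 0 0 PySem.Dict.empty

-- ===== PRECONDITION & SPEC =====
-- Pre_ restricts to the natural domain window_size ≥ 1 (for window_size ≤ 0 A's grouping
-- by empty/negative slices is an accident of Python slice semantics and B's float TOP
-- collapses all codes) and excludes min_repeats ≤ 1 when at least one window exists and
-- the length gate passes — exactly where A's 'positions[1]' raises IndexError.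
def Pre_detect_looping_onset (token_ids : List Int) (window_size : Int) (min_repeats : Int) : Prop :=
  1 ≤ window_size ∧
    (2 ≤ min_repeats ∨ (token_ids.length : Int) < window_size * min_repeats ∨
      (token_ids.length : Int) < window_size)
instance (token_ids : List Int) (window_size : Int) (min_repeats : Int) : Decidable (Pre_detect_looping_onset token_ids window_size min_repeats) := by unfold Pre_detect_looping_onset; infer_instance

def pvWitness_detect_looping_onset : List Int × Int × Int := ([1, 2, 1, 2, 1, 2], 2, 3)

def Spec_detect_looping_onset (token_ids : List Int) (window_size : Int) (min_repeats : Int) (out : Option Int) : Prop := out = detect_looping_onset_alt token_ids window_size min_repeats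
instance (token_ids : List Int) (window_size : Int) (min_repeats : Int) (out : Option Int) : Decidable (Spec_detect_looping_onset token_ids window_size min_repeats out) := by unfold Spec_detect_looping_onset; infer_instance

-- ===== CLAIM (what is proved, stated in full; the proofs are below) =====
def Claim_equal_detect_looping_onset : Prop := ∀ (token_ids : List Int) (window_size : Int) (min_repeats : Int), Dom_detect_looping_onset token_ids window_size min_repeats → Pre_detect_looping_onset token_ids window_size min_repeats → Spec_detect_looping_onset token_ids window_size min_repeats (detect_looping_onset token_ids window_size min_repeats)

-- ===== LEMMAS AND PROOFS =====

-- the window A builds at position i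
def pvWin (xs : List Int) (w i : Int) : List Int :=
  PySem.List.slice xs (some i) (some (i + w))

lemma pvWin_def (xs : List Int) (w i : Int) :
    PySem.List.slice xs (some i) (some (i + w)) = pvWin xs w i := rfl

-- B's big-endian code of a digit list
def pvEncB : List Int → Int
  | [] => 0
  | a :: l => (a + 2147483648) * 8589934592 ^ l.length + pvEncB l

-- (count, second occurrence) statistics B stores for a position list
def pvStat (L : List Int) : Int × Int :=
  ((L.length : Int), (PySem.List.pyGet? L 1).getD (-1))

lemma pvEncB_cons (a : Int) (l : List Int) :
    pvEncB (a :: l) = (a + 2147483648) * 8589934592 ^ l.length + pvEncB l := rfl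

lemma pvEncB_append_singleton (l : List Int) (d : Int) :
    pvEncB (l ++ [d]) = pvEncB l * 8589934592 + (d + 2147483648) := by
  induction l with
  | nil => simp [pvEncB]
  | cons a l ih =>
    rw [List.cons_append, pvEncB_cons, pvEncB_cons, ih, List.length_append, List.length_cons]
    simp only [List.length_nil]
    ring

lemma pvEncB_bounds (l : List Int)
    (h : ∀ t ∈ l, -2147483648 ≤ t ∧ t ≤ 2147483648) :
    0 ≤ pvEncB l ∧ pvEncB l < 8589934592 ^ l.length := by
  induction l with
  | nil => simp [pvEncB]
  | cons a l ih =>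
    obtain ⟨h1, h2⟩ := ih (fun t ht => h t (by simp [ht]))
    have ha := h a (by simp)
    rw [pvEncB_cons, List.length_cons]
    have hp : (0 : Int) < 8589934592 ^ l.length := by positivity
    constructor
    · nlinarith
    · have hd : a + 2147483648 ≤ 8589934591 := by omega
      have : (a + 2147483648) * 8589934592 ^ l.length ≤ 8589934591 * 8589934592 ^ l.length :=
        mul_le_mul_of_nonneg_right hd (le_of_lt hp)
      calc (a + 2147483648) * 8589934592 ^ l.length + pvEncB l
          < (a + 2147483648) * 8589934592 ^ l.length + 8589934592 ^ l.length := by omega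
        _ ≤ 8589934591 * 8589934592 ^ l.length + 8589934592 ^ l.length := by omega
        _ = 8589934592 ^ (l.length + 1) := by ring

lemma pvEncB_mod_lt (l : List Int) (k : Nat)
    (h : ∀ t ∈ l, -2147483648 ≤ t ∧ t ≤ 2147483648) (hlen : l.length ≤ k) :
    PySem.Int.mod (pvEncB l) (8589934592 ^ k) = pvEncB l := by
  obtain ⟨h1, h2⟩ := pvEncB_bounds l h
  have hpk : (0 : Int) < 8589934592 ^ k := by positivity
  rw [PySem.Int.mod_eq_emod_of_pos hpk]
  exact Int.emod_eq_of_lt h1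
    (lt_of_lt_of_le h2 (pow_le_pow_right₀ (by norm_num) hlen))

lemma pvEncB_mod_cons (a : Int) (l : List Int)
    (h : ∀ t ∈ a :: l, -2147483648 ≤ t ∧ t ≤ 2147483648) :
    PySem.Int.mod (pvEncB (a :: l)) (8589934592 ^ l.length) = pvEncB l := by
  obtain ⟨h1, h2⟩ := pvEncB_bounds l (fun t ht => h t (by simp [ht]))
  have hpk : (0 : Int) < 8589934592 ^ l.length := by positivity
  rw [PySem.Int.mod_eq_emod_of_pos hpk, pvEncB_cons]
  rw [add_comm, Int.add_mul_emod_self_right]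
  exact Int.emod_eq_of_lt h1 h2

lemma pvEncB_inj : ∀ (l1 l2 : List Int), l1.length = l2.length →
    (∀ t ∈ l1, -2147483648 ≤ t ∧ t ≤ 2147483648) →
    (∀ t ∈ l2, -2147483648 ≤ t ∧ t ≤ 2147483648) →
    pvEncB l1 = pvEncB l2 → l1 = l2 := by
  intro l1
  induction l1 with
  | nil => intro l2 hlen _ _ _; cases l2 <;> simp_all
  | cons a l ih =>
    intro l2 hlen hb1 hb2 henc
    cases l2 with
    | nil => simp at hlen
    | cons b l2 =>
      have hlen' : l.length = l2.length := by simpa using hlen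
      have ha := hb1 a (by simp)
      have hb := hb2 b (by simp)
      obtain ⟨hr1, hr1'⟩ := pvEncB_bounds l (fun t ht => hb1 t (by simp [ht]))
      obtain ⟨hr2, hr2'⟩ := pvEncB_bounds l2 (fun t ht => hb2 t (by simp [ht]))
      rw [pvEncB_cons, pvEncB_cons, hlen'] at henc
      have hp : (0 : Int) < 8589934592 ^ l2.length := by positivity
      rw [hlen'] at hr1'
      have hmul : (a - b) * 8589934592 ^ l2.length = pvEncB l2 - pvEncB l := by
        linear_combination henc
      have hab : a = b := by
        rcases lt_trichotomy a b with hlt | heq | hgt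
        · have : (a - b) * 8589934592 ^ l2.length ≤ -1 * 8589934592 ^ l2.length :=
            mul_le_mul_of_nonneg_right (by omega) (le_of_lt hp)
          linarith
        · exact heq
        · have : 1 * 8589934592 ^ l2.length ≤ (a - b) * 8589934592 ^ l2.length :=
            mul_le_mul_of_nonneg_right (by omega) (le_of_lt hp)
          linarith
      subst hab
      have heq : pvEncB l = pvEncB l2 := by
        linear_combination hmul
      rw [ih l2 hlen' (fun t ht => hb1 t (by simp [ht])) (fun t ht => hb2 t (by simp [ht])) heq]

lemma pvWin_eq_drop_take (xs : List Int) (w i : Int) (hi : 0 ≤ i) (hw : 0 ≤ w) :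
    pvWin xs w i = (xs.drop i.toNat).take w.toNat := by
  unfold pvWin
  rw [PySem.List.slice_toNat xs hi (by omega)]
  congr 1
  omega

lemma pvWin_length (xs : List Int) (w i : Int) (hi : 0 ≤ i) (hw : 0 ≤ w)
    (hn : i + w ≤ (xs.length : Int)) : (pvWin xs w i).length = w.toNat := by
  rw [pvWin_eq_drop_take xs w i hi hw]
  simp only [List.length_take, List.length_drop]
  omega

lemma pvWin_bounded (xs : List Int) (w i : Int)
    (hdom : ∀ t ∈ xs, -2147483648 ≤ t ∧ t ≤ 2147483648) :
    ∀ t ∈ pvWin xs w i, -2147483648 ≤ t ∧ t ≤ 2147483648 := by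
  intro t ht
  unfold pvWin at ht
  exact hdom t (PySem.List.mem_of_mem_slice xs _ _ ht)

-- L[1] of an extended position list, as B maintains it
lemma pvStat_snd_append (L : List Int) (i : Int) (h : 1 ≤ L.length) :
    PySem.List.pyGet? (L ++ [i]) 1
      = some (if ((L.length : Int) + 1) = 2 then i else (PySem.List.pyGet? L 1).getD (-1)) := by
  match L with
  | [a] => simp [PySem.List.pyGet?, PySem.List.pyIdx?]
  | a :: b :: L =>
    have : ¬ (((a :: b :: L).length : Int) + 1) = 2 := by simp; omega
    simp only [this, if_false]
    simp [PySem.List.pyGet?, PySem.List.pyIdx?,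
      show (0 : Int) ≤ (L.length : Int) + 1 from by positivity]

-- skip phase: B builds the code of the first w-1 tokens while producing no window
lemma pvBLoop_build (xs : List Int) (w m : Int) (hw : 1 ≤ w)
    (hdom : ∀ t ∈ xs, -2147483648 ≤ t ∧ t ≤ 2147483648)
    (hlen : w.toNat - 1 ≤ xs.length) (d : PySem.Dict Int (Int × Int)) :
    ∀ (k j : Nat), j + k = w.toNat - 1 →
    pvBLoop w m (8589934592 ^ (w - 1).toNat) (xs.drop j) (j : Int) (pvEncB (xs.take j)) d
      = pvBLoop w m (8589934592 ^ (w - 1).toNat) (xs.drop (w.toNat - 1)) (w - 1)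
          (pvEncB (xs.take (w.toNat - 1))) d := by
  intro k
  induction k with
  | zero =>
    intro j hj
    have h1 : j = w.toNat - 1 := by omega
    subst h1
    congr 1
    omega
  | succ k ih =>
    intro j hj
    have hjlt : j < xs.length := by omega
    rw [List.drop_eq_getElem_cons hjlt]
    simp only [pvBLoop]
    have hlt : (j : Int) - w + 1 < 0 := by omega
    simp only [hlt, if_true]
    have hcode : PySem.Int.mod (pvEncB (xs.take j)) (8589934592 ^ (w - 1).toNat) * 8589934592
        + xs[j] + 2147483648 = pvEncB (xs.take (j + 1)) := by
      rw [pvEncB_mod_lt _ _ (fun t ht => hdom t (List.mem_of_mem_take ht))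
            (by rw [List.length_take]; omega)]
      rw [List.take_add_one, List.getElem?_eq_getElem hjlt]
      simp only [Option.toList_some]
      rw [pvEncB_append_singleton]
      ring
    rw [hcode]
    have := ih (j + 1) (by omega)
    rw [show ((j : Int) + 1) = ((j + 1 : Nat) : Int) from by push_cast; ring]
    exact this

-- the rolling-code step produces the code of the current window
lemma pvCode_step (xs : List Int) (w i : Int) (hw : 1 ≤ w) (hi : 0 ≤ i)
    (hn : i + w ≤ (xs.length : Int))
    (hdom : ∀ t ∈ xs, -2147483648 ≤ t ∧ t ≤ 2147483648) :
    PySem.Int.mod (if i ≤ 0 then pvEncB (xs.take (w.toNat - 1)) else pvEncB (pvWin xs w (i - 1)))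
        (8589934592 ^ (w - 1).toNat) * 8589934592
      + xs[(i + w - 1).toNat]'(by omega) + 2147483648 = pvEncB (pvWin xs w i) := by
  have hkn : (i + w - 1).toNat < xs.length := by omega
  by_cases hiz : i ≤ 0
  · have h0 : i = 0 := by omega
    subst h0
    simp only [if_true, le_refl]
    simp only [show ((0 : Int) + w - 1).toNat = w.toNat - 1 from by omega]
    rw [pvEncB_mod_lt _ _ (fun t ht => hdom t (List.mem_of_mem_take ht))
          (by rw [List.length_take]; omega)]
    have hwin : pvWin xs w 0 = xs.take (w.toNat - 1) ++ [xs[w.toNat - 1]'(by omega)] := by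
      rw [pvWin_eq_drop_take xs w 0 le_rfl (by omega)]
      simp only [Int.toNat_zero, List.drop_zero]
      conv_lhs => rw [show w.toNat = (w.toNat - 1) + 1 from by omega]
      rw [List.take_add_one]
      rw [List.getElem?_eq_getElem (by omega : w.toNat - 1 < xs.length)]
      simp only [Option.toList_some]
    rw [hwin, pvEncB_append_singleton]
    ring
  · simp only [hiz, if_false]
    have hi1 : 1 ≤ i := by omega
    set j := (i - 1).toNat with hj
    have hjn : j < xs.length := by omega
    have hprev : pvWin xs w (i - 1) = xs[j] :: (xs.drop (j + 1)).take (w.toNat - 1) := by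
      rw [pvWin_eq_drop_take xs w (i - 1) (by omega) (by omega)]
      rw [List.drop_eq_getElem_cons hjn]
      rw [show w.toNat = (w.toNat - 1) + 1 from by omega, List.take_succ_cons]
      simp
    have hcur : pvWin xs w i = (xs.drop (j + 1)).take (w.toNat - 1) ++ [xs[(i + w - 1).toNat]] := by
      rw [pvWin_eq_drop_take xs w i (by omega) (by omega)]
      have hji : j + 1 = i.toNat := by omega
      rw [hji]
      rw [show w.toNat = (w.toNat - 1) + 1 from by omega, List.take_add_one]
      congr 1
      have hlt : w.toNat - 1 < (xs.drop i.toNat).length := by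
        rw [List.length_drop]; omega
      rw [List.getElem?_eq_getElem hlt]
      simp only [Option.toList_some]
      congr 1
      rw [List.getElem_drop]
      congr 1
      omega
    have hmidlen : ((xs.drop (j + 1)).take (w.toNat - 1)).length = (w - 1).toNat := by
      rw [List.length_take, List.length_drop]; omega
    rw [hprev, hcur]
    rw [show (8589934592 : Int) ^ (w - 1).toNat = 8589934592 ^ ((xs.drop (j + 1)).take (w.toNat - 1)).length
          from by rw [hmidlen]]
    rw [pvEncB_mod_cons _ _ (by rw [← hprev]; exact pvWin_bounded xs w (i - 1) hdom)]
    rw [pvEncB_append_singleton]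
    ring

-- lockstep phase: A over window indices, B over the tokens ending each window
lemma pvLoop_eq (xs : List Int) (w m : Int) (hw : 1 ≤ w) (hm : 2 ≤ m)
    (hdom : ∀ t ∈ xs, -2147483648 ≤ t ∧ t ≤ 2147483648) :
    ∀ (k : Nat) (i : Int), 0 ≤ i → i + k = (xs.length : Int) - w + 1 →
    ∀ (dA : PySem.Dict (List Int) (List Int)) (dB : PySem.Dict Int (Int × Int)) (code : Int),
    (∀ key, dA.getD key [] =
      (PySem.List.pyRange 0 i 1).filter (fun j => decide (pvWin xs w j = key))) →
    (∀ c, dB.getD c (0, -1) =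
      pvStat ((PySem.List.pyRange 0 i 1).filter (fun j => decide (pvEncB (pvWin xs w j) = c)))) →
    code = (if i ≤ 0 then pvEncB (xs.take (w.toNat - 1)) else pvEncB (pvWin xs w (i - 1))) →
    pvALoop xs w m (PySem.List.pyRange i ((xs.length : Int) - w + 1) 1) dA
      = pvBLoop w m (8589934592 ^ (w - 1).toNat) (xs.drop (i + w - 1).toNat) (i + w - 1) code dB := by
  intro k
  induction k with
  | zero =>
    intro i hi0 hik dA dB code hA hB hcode
    rw [PySem.List.pyRange_one_eq_nil (by omega : (xs.length : Int) - w + 1 ≤ i)]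
    have hdrop : (i + w - 1).toNat = xs.length := by omega
    rw [hdrop, List.drop_length]
    rfl
  | succ k ih =>
    intro i hi0 hik dA dB code hA hB hcode
    have hilt : i < (xs.length : Int) - w + 1 := by omega
    have hiw : i + w ≤ (xs.length : Int) := by omega
    have hkn : (i + w - 1).toNat < xs.length := by omega
    rw [PySem.List.pyRange_one_cons hilt, List.drop_eq_getElem_cons hkn]
    simp only [pvALoop, pvBLoop]
    have hstart : ¬ ((i + w - 1) - w + 1 < 0) := by omega
    simp only [hstart, if_false]
    rw [pvWin_def]
    have hcode' : PySem.Int.mod code (8589934592 ^ (w - 1).toNat) * 8589934592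
        + xs[(i + w - 1).toNat] + 2147483648 = pvEncB (pvWin xs w i) := by
      rw [hcode]; exact pvCode_step xs w i hw hi0 hiw hdom
    rw [hcode']
    have hWlen : ∀ j : Int, 0 ≤ j → j + w ≤ (xs.length : Int) → (pvWin xs w j).length = w.toNat :=
      fun j h1 h2 => pvWin_length xs w j h1 (by omega) h2
    have hfiltereq :
        (PySem.List.pyRange 0 i 1).filter (fun j => decide (pvEncB (pvWin xs w j) = pvEncB (pvWin xs w i)))
          = (PySem.List.pyRange 0 i 1).filter (fun j => decide (pvWin xs w j = pvWin xs w i)) := by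
      apply List.filter_congr
      intro j hj
      rw [PySem.List.mem_pyRange_one] at hj
      simp only [decide_eq_decide]
      constructor
      · intro h
        exact pvEncB_inj _ _ (by rw [hWlen j hj.1 (by omega), hWlen i hi0 hiw])
          (pvWin_bounded xs w j hdom) (pvWin_bounded xs w i hdom) h
      · intro h; rw [h]
    set L := (PySem.List.pyRange 0 i 1).filter (fun j => decide (pvWin xs w j = pvWin xs w i)) with hL
    have hgetA : (dA.setdefault (pvWin xs w i) []).getD (pvWin xs w i) [] = L := by
      rw [PySem.Dict.getD_setdefault_self, hA]
    have hgetB : dB.getD (pvEncB (pvWin xs w i)) (0, -1) = pvStat L := by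
      rw [hB, hfiltereq]
    rw [hgetA, hgetB]
    simp only [pvStat]
    have hcntlen : ((L ++ [i]).length : Int) = (L.length : Int) + 1 := by
      simp
    by_cases hstop : m ≤ (L.length : Int) + 1
    · rw [if_pos (by rw [hcntlen]; exact hstop), if_pos hstop]
      have hL1 : 1 ≤ L.length := by omega
      rw [pvStat_snd_append L i hL1]
      rw [show (i + w - 1) - w + 1 = i from by ring]
    · rw [if_neg (by rw [hcntlen]; exact hstop), if_neg hstop]
      have hrec := ih (i + 1) (by omega) (by omega)
        ((dA.setdefault (pvWin xs w i) []).insert (pvWin xs w i) (L ++ [i]))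
        (dB.insert (pvEncB (pvWin xs w i))
          ((L.length : Int) + 1, if (L.length : Int) + 1 = 2 then (i + w - 1) - w + 1
            else (PySem.List.pyGet? L 1).getD (-1)))
        (pvEncB (pvWin xs w i))
        ?_ ?_ ?_
      · rw [show (i + w - 1) + 1 = (i + 1) + w - 1 from by ring,
            show (i + w - 1).toNat + 1 = ((i + 1) + w - 1).toNat from by omega]
        exact hrec
      · -- A-side invariant after the insert
        intro key
        rw [PySem.List.pyRange_one_succ_right hi0, List.filter_append]
        by_cases hc : key = pvWin xs w i
        · subst hc
          rw [PySem.Dict.getD_insert_self]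
          simp [hL]
        · rw [PySem.Dict.getD_insert_of_ne _ _ _ hc,
              PySem.Dict.getD_eq_get?_getD, PySem.Dict.get?_setdefault_of_ne _ _ hc,
              ← PySem.Dict.getD_eq_get?_getD, hA]
          have : decide (pvWin xs w i = key) = false := by
            simp; exact fun h => hc h.symm
          simp [this]
      · -- B-side invariant after the insert
        intro c
        rw [PySem.List.pyRange_one_succ_right hi0, List.filter_append]
        by_cases hc : c = pvEncB (pvWin xs w i)
        · subst hc
          rw [PySem.Dict.getD_insert_self, hfiltereq,
              show List.filter (fun j => decide (pvEncB (pvWin xs w j) = pvEncB (pvWin xs w i))) [i]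
                = [i] from by simp]
          simp only [pvStat, Prod.mk.injEq]
          constructor
          · simp
          · rw [show (i + w - 1) - w + 1 = i from by ring]
            by_cases h1 : 1 ≤ L.length
            · rw [pvStat_snd_append L i h1]
              simp
            · have h0 : L = [] := List.length_eq_zero_iff.mp (by omega)
              rw [h0]
              simp [PySem.List.pyGet?, PySem.List.pyIdx?]
        · rw [PySem.Dict.getD_insert_of_ne _ _ _ hc, hB]
          have : decide (pvEncB (pvWin xs w i) = c) = false := by
            simp; exact fun h => hc h.symm
          simp [this]
      · rw [if_neg (by omega : ¬ i + 1 ≤ 0)]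
        simp

-- ===== VERDICT (by name: the statement is the Claim_ definition above) =====
theorem detect_looping_onset_spec : Claim_equal_detect_looping_onset := by
  intro xs w m hdom hpre
  obtain ⟨hw, hrest⟩ := hpre
  have hdom' : ∀ t ∈ xs, -2147483648 ≤ t ∧ t ≤ 2147483648 := by
    intro t ht
    unfold Dom_detect_looping_onset at hdom
    simp only [Bool.and_eq_true, List.all_eq_true] at hdom
    have := hdom.1.1 t ht
    simpa [pvDomInt] using this
  unfold Spec_detect_looping_onset detect_looping_onset detect_looping_onset_alt
  by_cases hlen : (xs.length : Int) < w * m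
  · simp [hlen]
  · simp only [hlen, if_false]
    by_cases hshort : (xs.length : Int) < w
    · rw [if_pos hshort, PySem.List.pyRange_one_eq_nil (by omega : (xs.length : Int) - w + 1 ≤ 0)]
      rfl
    · rw [if_neg hshort]
      have hm : 2 ≤ m := by tauto
      have h0 : pvBLoop w m (8589934592 ^ (w - 1).toNat) xs 0 0 PySem.Dict.empty
          = pvBLoop w m (8589934592 ^ (w - 1).toNat) (xs.drop (w.toNat - 1)) (w - 1)
              (pvEncB (xs.take (w.toNat - 1))) PySem.Dict.empty := by
        have := pvBLoop_build xs w m hw hdom' (by omega) PySem.Dict.empty (w.toNat - 1) 0 (by omega)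
        simpa [pvEncB] using this
      rw [h0]
      have hmain := pvLoop_eq xs w m hw hm hdom' ((xs.length : Int) - w + 1).toNat 0 le_rfl
        (by omega) PySem.Dict.empty PySem.Dict.empty (pvEncB (xs.take (w.toNat - 1)))
        (fun key => by simp [PySem.Dict.getD_empty, PySem.List.pyRange_one_eq_nil (le_refl (0 : Int))])
        (fun c => by simp [PySem.Dict.getD_empty, PySem.List.pyRange_one_eq_nil (le_refl (0 : Int)), pvStat, PySem.List.pyGet?, PySem.List.pyIdx?])
        (by rw [if_pos (le_refl (0 : Int))])
      rw [show ((0 : Int) + w - 1).toNat = w.toNat - 1 from by omega,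
          show (0 : Int) + w - 1 = w - 1 from by ring] at hmain
      exact hmain
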